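-- pv_equiv track=rewrite | github.com/LULLULALLA0525/Everyday_CodingTest | 부녀회장이 될테야.py | solution
-- ===== SOURCE A (Python) =====
-- def solution(K, N):
--     hotel = []
--     for _ in range(15):
--         hotel.append([0] * 15)
--
--     for i in range(15):
--         hotel[0][i] = i + 1
--
--     for floor in range(1, 15):
--         for room in range(15):
--             hotel[floor][room] = sum(hotel[floor - 1][:room + 1])
--
--     return hotel[K][N - 1]
-- ===== SOURCE B (Python) =====
-- def solution(K, N):
--     # Build each row as the running prefix sums of the previous row.
--     hotel = [list(range(1, 16))]
--     for _ in range(14):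
--         prev = hotel[-1]
--         row = []
--         acc = 0
--         for x in prev:
--             acc += x
--             row.append(acc)
--         hotel.append(row)
--     return hotel[K][N - 1]
-- ===== Notes on version B (the rewrite author's own statement) =====
-- stated objective: faster
-- what changed: Each new row is built as the running prefix sums of the previous row with a single accumulator (rows grown by append), instead of re-slicing and re-summing the previous row for every cell of a preallocated 15x15 grid.
import Mathlib
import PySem

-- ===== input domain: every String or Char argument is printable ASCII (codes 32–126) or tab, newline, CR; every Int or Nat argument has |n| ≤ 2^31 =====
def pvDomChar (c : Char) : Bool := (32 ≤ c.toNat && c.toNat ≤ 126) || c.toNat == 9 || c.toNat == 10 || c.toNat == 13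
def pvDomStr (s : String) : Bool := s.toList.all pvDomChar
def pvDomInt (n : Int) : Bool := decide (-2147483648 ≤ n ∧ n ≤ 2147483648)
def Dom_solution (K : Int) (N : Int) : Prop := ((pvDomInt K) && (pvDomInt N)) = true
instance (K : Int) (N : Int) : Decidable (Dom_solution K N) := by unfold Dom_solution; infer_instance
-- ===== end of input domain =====

-- B replaces the per-cell rescan sum(prev[:room+1]) by building each row as the
-- running prefix sums of the previous row (objective: faster, constant-factor).

-- ===== PORT A =====
-- the 15x15 table A builds; it does not depend on K, N, so it is a constant helper
def hotelA : List (List Int) :=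
  -- hotel = 15 rows of [0]*15
  let hotel : List (List Int) := List.replicate 15 (List.replicate 15 0)
  -- for i in range(15): hotel[0][i] = i + 1
  let hotel := (PySem.List.pyRange 0 15 1).foldl
    (fun h i => h.set 0 ((h.getD 0 []).set i.toNat (i + 1))) hotel
  -- for floor in range(1,15): for room in range(15): hotel[floor][room] = sum(hotel[floor-1][:room+1])
  (PySem.List.pyRange 1 15 1).foldl
    (fun h floor =>
      (PySem.List.pyRange 0 15 1).foldl
        (fun h room =>
          h.set floor.toNat ((h.getD floor.toNat []).set room.toNat
            ((PySem.List.slice (h.getD (floor.toNat - 1) []) none (some (room + 1))).sum)))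
        h)
    hotel

def solution (K : Int) (N : Int) : Int :=
  -- return hotel[K][N-1]; under Pre_ both indices are in range (getD default unreached)
  (PySem.List.pyGet? ((PySem.List.pyGet? hotelA K).getD []) (N - 1)).getD 0

-- ===== PORT B =====
-- row of running prefix sums of prev (acc loop with append)
def prefixRowB (prev : List Int) : List Int :=
  (prev.foldl (fun (st : Int × List Int) x => (st.1 + x, st.2 ++ [st.1 + x])) (0, [])).2

-- B's table: start from [1..15], append 14 prefix-sum rows
def hotelB : List (List Int) :=
  (List.range 14).foldl
    (fun h _ => h ++ [prefixRowB ((PySem.List.pyGet? h (-1)).getD [])])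
    [PySem.List.pyRange 1 16 1]

def solution_alt (K : Int) (N : Int) : Int :=
  (PySem.List.pyGet? ((PySem.List.pyGet? hotelB K).getD []) (N - 1)).getD 0

-- ===== PRECONDITION & SPEC =====
-- Pre_ excludes exactly the inputs where the Python A raises IndexError
-- (K outside [-15,14] or N-1 outside [-15,14] for the 15x15 table).
def Pre_solution (K : Int) (N : Int) : Prop :=
  (-15 ≤ K ∧ K ≤ 14) ∧ (-14 ≤ N ∧ N ≤ 15)
instance (K : Int) (N : Int) : Decidable (Pre_solution K N) := by
  unfold Pre_solution; infer_instance
def pvWitness_solution : Int × Int := (2, 3)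

def Spec_solution (K : Int) (N : Int) (out : Int) : Prop := out = solution_alt K N
instance (K : Int) (N : Int) (out : Int) : Decidable (Spec_solution K N out) := by
  unfold Spec_solution; infer_instance

-- ===== CLAIM (what is proved, stated in full; the proofs are below) =====
def Claim_equal_solution : Prop :=
  ∀ (K : Int) (N : Int), Dom_solution K N → Pre_solution K N → Spec_solution K N (solution K N)

-- ===== LEMMAS AND PROOFS =====
set_option maxRecDepth 10000 in
theorem hotelA_eq_hotelB : hotelA = hotelB := by decide

-- ===== VERDICT (by name: the statement is the Claim_ definition above) =====
theorem solution_spec : Claim_equal_solution := by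
  intro K N _ _
  unfold Spec_solution solution solution_alt
  rw [hotelA_eq_hotelB]
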